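-- pv_equiv track=rewrite | github.com/Maetthu24/adventofcode | days/y2020/day6.py | part2
-- ===== SOURCE A (Python) =====
-- def part2(input_data):
--     input_data = '\n'.join(input_data).split('\n\n')
--
--     sum = 0
--     for string in input_data:
--         possible = set('abcdefghijklmnopqrstuvwxyz')
--         for line in string.split('\n'):
--             possible = possible.intersection(line)
--         sum += len(possible)
--
--     yield sum
-- ===== SOURCE B (Python) =====
-- def part2(input_data):
--     total = 0
--     for group in '\n'.join(input_data).split('\n\n'):
--         lines = group.split('\n')
--         n = len(lines)
--         cnt = {}
--         for line in lines:
--             for c in set(line):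
--                 cnt[c] = cnt.get(c, 0) + 1
--         total += sum(1 for c in 'abcdefghijklmnopqrstuvwxyz' if cnt.get(c, 0) == n)
--     yield total
-- ===== Notes on version B (the rewrite author's own statement) =====
-- stated objective: alternative
-- what changed: Replaces the per-group iterative set intersection (start from the alphabet, shrink it through every line) with a one-pass frequency table of distinct letters per line, then counts the alphabet letters whose frequency equals the number of lines in the group.
import Mathlib
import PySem

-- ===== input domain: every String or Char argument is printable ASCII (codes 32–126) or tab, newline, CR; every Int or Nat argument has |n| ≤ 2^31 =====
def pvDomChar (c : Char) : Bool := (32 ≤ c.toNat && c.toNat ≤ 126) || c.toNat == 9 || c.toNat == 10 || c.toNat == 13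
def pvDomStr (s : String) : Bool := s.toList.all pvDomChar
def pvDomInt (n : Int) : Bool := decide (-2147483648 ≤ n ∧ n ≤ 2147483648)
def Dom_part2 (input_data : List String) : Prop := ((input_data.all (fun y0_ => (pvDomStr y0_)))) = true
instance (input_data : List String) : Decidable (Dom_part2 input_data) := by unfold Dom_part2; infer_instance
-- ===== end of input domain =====

-- B replaces the shrinking set-intersection per group by a per-letter frequency table
-- (distinct letters per line) and counts the letters whose count equals the line count
-- (objective: alternative/idiomatic; same asymptotic cost).

-- ===== PORT A =====
-- port of A: join lines, split on '\n\n'; per group intersect the alphabet set with each line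
def part2 (input_data : List String) : List Int :=
  let groups := (PySem.Str.split? (PySem.Str.join "\n" input_data) "\n\n").getD []  -- sep ≠ "", total form
  let sum : Int := groups.foldl (fun s string =>
    s + PySem.Set.len
      (((PySem.Str.split? string "\n").getD []).foldl
        (fun possible line => PySem.Set.inter possible line.toList)
        (PySem.Set.ofList "abcdefghijklmnopqrstuvwxyz".toList))) 0
  [sum]

-- ===== PORT B =====
-- port of B: per group build a dict counting, for each char, the lines whose char-set contains it,
-- then count the alphabet letters whose count equals the number of lines
def part2_alt (input_data : List String) : List Int :=
  let total : Int := (((PySem.Str.split? (PySem.Str.join "\n" input_data) "\n\n").getD [])).foldl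
    (fun total group =>
      let lines := (PySem.Str.split? group "\n").getD []
      let cnt : PySem.Dict Char Int := lines.foldl
        (fun cnt line =>
          (PySem.Set.ofList line.toList).foldl
            (fun cnt c => cnt.insert c (cnt.getD c 0 + 1)) cnt)
        PySem.Dict.empty
      total + (("abcdefghijklmnopqrstuvwxyz".toList).filter
        (fun c => cnt.getD c 0 == (lines.length : Int))).length) 0
  [total]

-- ===== PRECONDITION & SPEC =====
def Spec_part2 (input_data : List String) (out : List Int) : Prop := out = part2_alt input_data
instance (input_data : List String) (out : List Int) : Decidable (Spec_part2 input_data out) := by unfold Spec_part2; infer_instance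

-- ===== CLAIM (what is proved, stated in full; the proofs are below) =====
def Claim_equal_part2 : Prop := ∀ (input_data : List String), Dom_part2 input_data → Spec_part2 input_data (part2 input_data)

-- ===== LEMMAS AND PROOFS =====

-- A's intersection fold = filter by membership in every line
theorem interFold_eq_filter (lines : List String) (s : PySem.Set Char) :
    lines.foldl (fun possible line => PySem.Set.inter possible line.toList) s
      = s.filter (fun c => lines.all (fun l => l.toList.contains c)) := by
  induction lines generalizing s with
  | nil => simp
  | cons l ls ih =>
      simp only [List.foldl_cons]
      rw [ih]
      simp only [PySem.Set.inter, List.filter_filter, List.all_cons]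
      apply List.filter_congr
      intro c _
      simp [Bool.and_comm]

-- one insert-count loop adds the multiplicity of each element
theorem getD_insFold (l : List Char) (d : PySem.Dict Char Int) (c : Char) :
    (l.foldl (fun cnt x => cnt.insert x (cnt.getD x 0 + 1)) d).getD c 0
      = d.getD c 0 + (l.count c : Int) := by
  induction l generalizing d with
  | nil => simp
  | cons x xs ih =>
      simp only [List.foldl_cons, ih, PySem.Dict.getD_insert, List.count_cons, beq_iff_eq]
      by_cases h : c = x
      · subst h; simp; omega
      · have h' : ¬(x = c) := fun e => h e.symm
        simp [h, h']

-- nodup list: count is a membership indicator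
theorem count_ofList (xs : List Char) (c : Char) :
    ((PySem.Set.ofList xs).count c : Int) = if c ∈ xs then 1 else 0 := by
  by_cases h : c ∈ xs
  · rw [List.count_eq_one_of_mem (PySem.Set.nodup_ofList xs) ((PySem.Set.mem_ofList _ _).2 h)]
    simp [h]
  · rw [List.count_eq_zero.2 (fun hm => h ((PySem.Set.mem_ofList _ _).1 hm))]
    simp [h]

-- B's counter over all lines: count = number of lines containing c
theorem getD_cntFold (lines : List String) (d : PySem.Dict Char Int) (c : Char) :
    (lines.foldl (fun cnt line =>
        (PySem.Set.ofList line.toList).foldl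
          (fun cnt x => cnt.insert x (cnt.getD x 0 + 1)) cnt) d).getD c 0
      = d.getD c 0 + ((lines.filter (fun l => l.toList.contains c)).length : Int) := by
  induction lines generalizing d with
  | nil => simp
  | cons l ls ih =>
      simp only [List.foldl_cons, ih, getD_insFold, count_ofList, List.filter_cons,
        List.contains_eq_mem, decide_eq_true_eq]
      split_ifs with h
      · simp; ring
      · simp

-- per-group equality of the two contributions
theorem group_eq (g : String) :
    PySem.Set.len
      (((PySem.Str.split? g "\n").getD []).foldl
        (fun possible line => PySem.Set.inter possible line.toList)
        (PySem.Set.ofList "abcdefghijklmnopqrstuvwxyz".toList))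
    = ((("abcdefghijklmnopqrstuvwxyz".toList).filter
        (fun c =>
          ((((PySem.Str.split? g "\n").getD []).foldl
            (fun cnt line => (PySem.Set.ofList line.toList).foldl
              (fun cnt x => cnt.insert x (cnt.getD x 0 + 1)) cnt)
            PySem.Dict.empty).getD c 0)
          == ((((PySem.Str.split? g "\n").getD []).length : Nat) : Int))).length : Int) := by
  set lines := (PySem.Str.split? g "\n").getD [] with hl
  rw [interFold_eq_filter, PySem.Set.ofList_eq_self_of_nodup _ (by decide), PySem.Set.len]
  congr 1
  apply congrArg List.length
  apply List.filter_congr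
  intro c _
  rw [getD_cntFold]
  simp only [PySem.Dict.getD_empty, zero_add]
  rw [Bool.eq_iff_iff]
  simp only [List.all_eq_true, beq_iff_eq, Nat.cast_inj]
  exact (List.length_filter_eq_length_iff).symm

-- ===== VERDICT (by name: the statement is the Claim_ definition above) =====
theorem part2_spec : Claim_equal_part2 := by
  intro input_data _
  unfold Spec_part2 part2 part2_alt
  dsimp only
  congr 1
  apply PySem.List.foldl_congr_mem
  intro acc g _
  rw [group_eq]
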